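-- pv_equiv track=rewrite | github.com/Alrefa3ee/Training | 2017/problemE.py | check_stage
-- ===== SOURCE A (Python) =====
-- import typing as t
--
-- def check_stage(stage: int, stages: t.List[int], counter: int = 0):
--     stages.sort()
--     available_stages = [i for i in stages if i-stage <= 60]
--     if not available_stages:
--         return counter
--     stage = max(available_stages)
--     counter += 1
--     [stages.remove(i) for i in available_stages]
--     return check_stage(stage, stages, counter)
-- ===== SOURCE B (Python) =====
-- def check_stage(stage, stages, counter=0):
--     # Return value only: A sorts and empties `stages` in place; B leaves it untouched.
--     xs = sorted(stages)
--     n = len(xs)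
--     thr = stage + 60
--     c = counter
--     i = 0
--     while i < n and xs[i] <= thr:
--         c += 1
--         last = xs[i]
--         i += 1
--         while i < n and xs[i] <= thr:
--             last = xs[i]
--             i += 1
--         thr = last + 60
--     return c
-- ===== Notes on version B (the rewrite author's own statement) =====
-- stated objective: faster
-- what changed: A re-sorts the remaining list and removes consumed elements one by one on every recursive round (quadratic); B sorts once and counts the rounds in a single linear sweep with a pointer and a moving threshold.
import Mathlib
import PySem

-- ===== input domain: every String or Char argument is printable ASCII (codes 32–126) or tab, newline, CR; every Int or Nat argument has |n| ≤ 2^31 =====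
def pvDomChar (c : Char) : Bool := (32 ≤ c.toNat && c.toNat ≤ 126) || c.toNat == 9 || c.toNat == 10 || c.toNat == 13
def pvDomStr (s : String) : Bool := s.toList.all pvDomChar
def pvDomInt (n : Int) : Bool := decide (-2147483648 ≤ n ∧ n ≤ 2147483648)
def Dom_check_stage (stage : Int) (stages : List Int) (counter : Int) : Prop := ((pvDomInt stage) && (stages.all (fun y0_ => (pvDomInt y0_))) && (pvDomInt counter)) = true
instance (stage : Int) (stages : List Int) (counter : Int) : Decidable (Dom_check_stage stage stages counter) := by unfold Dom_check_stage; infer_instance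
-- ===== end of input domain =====

-- B replaces A's quadratic sort-filter-remove recursion by one sort and a single
-- linear sweep with a moving threshold (return value only: A empties `stages` in place, B does not).

-- ===== PORT A =====

-- helper lemmas cited by check_stage's termination proof
theorem pvFilterEqTakeWhile (c : Int) (s : List Int) (hs : s.Pairwise (· ≤ ·)) :
    s.filter (fun i => decide (i - c ≤ 60)) = s.takeWhile (fun i => decide (i - c ≤ 60)) := by
  induction s with
  | nil => rfl
  | cons x xs ih =>
    rcases List.pairwise_cons.mp hs with ⟨hx, hxs⟩
    by_cases hpx : (x - c ≤ 60)
    · have hd : decide (x - c ≤ 60) = true := decide_eq_true hpx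
      rw [List.filter_cons, List.takeWhile_cons, hd]
      simp only [if_true]
      rw [ih hxs]
    · have hd : decide (x - c ≤ 60) = false := decide_eq_false hpx
      have hnil : List.filter (fun i => decide (i - c ≤ 60)) xs = [] :=
        List.filter_eq_nil_iff.mpr (fun y hy => by
          have := hx y hy
          simp only [decide_eq_true_eq]
          omega)
      rw [List.filter_cons, List.takeWhile_cons, hd]
      simp only [if_false, Bool.false_eq_true]
      exact hnil

theorem pvFoldlRemoveTakeWhile (p : Int → Bool) (s : List Int) :
    (s.takeWhile p).foldl (fun acc i => (PySem.List.remove? acc i).getD acc) s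
      = s.dropWhile p := by
  induction s with
  | nil => rfl
  | cons x xs ih =>
    by_cases hpx : p x = true
    · simp only [List.takeWhile_cons, List.dropWhile_cons, hpx, if_true, List.foldl_cons,
        PySem.List.remove?_cons_self, Option.getD_some]
      exact ih
    · simp [List.takeWhile_cons, List.dropWhile_cons, hpx]

theorem pvRestLen (stage : Int) (stages : List Int)
    (h : ¬ ((PySem.List.sorted stages (fun x => x)).filter (fun i => decide (i - stage ≤ 60))).isEmpty = true) :
    (((PySem.List.sorted stages (fun x => x)).filter (fun i => decide (i - stage ≤ 60))).foldl
        (fun acc i => (PySem.List.remove? acc i).getD acc)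
        (PySem.List.sorted stages (fun x => x))).length < stages.length := by
  set s := PySem.List.sorted stages (fun x => x) with hsdef
  have hp : s.Pairwise (· ≤ ·) := PySem.List.sorted_pairwise stages (fun x => x)
  rw [pvFilterEqTakeWhile _ _ hp] at h ⊢
  rw [pvFoldlRemoveTakeWhile]
  have hlen : s.length = stages.length := PySem.List.length_sorted stages (fun x => x) false
  have hsum := congrArg List.length
    (List.takeWhile_append_dropWhile (p := fun i => decide (i - stage ≤ 60)) (l := s))
  rw [List.length_append] at hsum
  have hne2 : (s.takeWhile (fun i => decide (i - stage ≤ 60))).length ≠ 0 := by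
    simpa [List.isEmpty_iff, List.length_eq_zero_iff] using h
  omega

def check_stage (stage : Int) (stages : List Int) (counter : Int) : Int :=
  let s := PySem.List.sorted stages (fun x => x)          -- stages.sort()
  let avail := s.filter (fun i => decide (i - stage ≤ 60)) -- [i for i in stages if i-stage <= 60]
  if avail.isEmpty then counter
  else
    let stage' := (PySem.List.max? avail (fun y => y)).getD 0  -- max(available_stages); nonempty here
    let rest := avail.foldl (fun acc i => (PySem.List.remove? acc i).getD acc) s
        -- [stages.remove(i) for i in available_stages]; every i is present, so remove never raises
    check_stage stage' rest (counter + 1)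
termination_by stages.length
decreasing_by
  exact pvRestLen stage stages ‹_›

-- ===== PORT B =====

-- inner while loop: consume the run of elements ≤ thr, tracking the last one
def csInner (thr last : Int) : List Int → Int × List Int
  | [] => (last, [])
  | x :: xs => if x ≤ thr then csInner thr x xs else (last, x :: xs)

theorem csInner_len (thr last : Int) (xs : List Int) :
    (csInner thr last xs).2.length ≤ xs.length := by
  induction xs generalizing last with
  | nil => simp [csInner]
  | cons x xs ih =>
    by_cases h : x ≤ thr
    · simp only [csInner, if_pos h]
      exact Nat.le_succ_of_le (ih x)
    · simp [csInner, if_neg h]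

-- outer while loop over the sorted list
def csOuter (thr c : Int) : List Int → Int
  | [] => c
  | x :: xs =>
    if x ≤ thr then
      let r := csInner thr x xs
      csOuter (r.1 + 60) (c + 1) r.2
    else c
termination_by l => l.length
decreasing_by
  exact Nat.lt_succ_of_le (csInner_len _ _ _)

def check_stage_alt (stage : Int) (stages : List Int) (counter : Int) : Int :=
  csOuter (stage + 60) counter (PySem.List.sorted stages (fun x => x))

-- ===== PRECONDITION & SPEC =====
def Spec_check_stage (stage : Int) (stages : List Int) (counter : Int) (out : Int) : Prop := out = check_stage_alt stage stages counter
instance (stage : Int) (stages : List Int) (counter : Int) (out : Int) : Decidable (Spec_check_stage stage stages counter out) := by unfold Spec_check_stage; infer_instance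

-- ===== CLAIM (what is proved, stated in full; the proofs are below) =====
def Claim_equal_check_stage : Prop := ∀ (stage : Int) (stages : List Int) (counter : Int), Dom_check_stage stage stages counter → Spec_check_stage stage stages counter (check_stage stage stages counter)

-- ===== LEMMAS AND PROOFS =====

theorem csInner_spec (thr last : Int) (xs : List Int) :
    csInner thr last xs
      = ((xs.takeWhile (fun x => decide (x ≤ thr))).getLastD last,
         xs.dropWhile (fun x => decide (x ≤ thr))) := by
  induction xs generalizing last with
  | nil => rfl
  | cons x xs ih =>
    by_cases h : x ≤ thr
    · have hd : decide (x ≤ thr) = true := decide_eq_true h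
      simp [csInner, h, hd, ih x, List.getLast?_cons, List.getLastD_eq_getLast?]
    · have hd : decide (x ≤ thr) = false := by simp [h]
      simp [csInner, h, hd]

theorem pvFoldlMaxSorted (x : Int) (t : List Int) (h : (x :: t).Pairwise (· ≤ ·)) :
    t.foldl max x = t.getLastD x := by
  induction t generalizing x with
  | nil => rfl
  | cons y ys ih =>
    rcases List.pairwise_cons.mp h with ⟨hx, hys⟩
    have hxy : x ≤ y := hx y List.mem_cons_self
    simp only [List.foldl_cons, max_eq_right hxy, List.getLastD_cons]
    exact ih y hys

theorem pvMain : ∀ (n : Nat) (stage : Int) (stages : List Int) (counter : Int),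
    stages.length ≤ n →
    check_stage stage stages counter
      = csOuter (stage + 60) counter (PySem.List.sorted stages (fun x => x)) := by
  intro n
  induction n with
  | zero =>
    intro stage stages counter hlen
    have h0 : stages = [] := List.length_eq_zero_iff.mp (Nat.le_zero.mp hlen)
    subst h0
    have hnil : PySem.List.sorted ([] : List Int) (fun x => x) = [] := rfl
    rw [check_stage]
    simp [hnil, csOuter]
  | succ n ih =>
    intro stage stages counter hlen
    have hp : (PySem.List.sorted stages (fun x => x)).Pairwise (· ≤ ·) :=
      PySem.List.sorted_pairwise stages (fun x => x)
    have hslen : (PySem.List.sorted stages (fun x => x)).length = stages.length :=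
      PySem.List.length_sorted stages (fun x => x) false
    have hpq : (fun i : Int => decide (i - stage ≤ 60)) = (fun i : Int => decide (i ≤ stage + 60)) := by
      funext i
      simp only [decide_eq_decide]
      omega
    rw [check_stage]
    rw [pvFilterEqTakeWhile stage _ hp, hpq]
    cases hs : PySem.List.sorted stages (fun x => x) with
    | nil => simp [csOuter]
    | cons x xs =>
      rw [hs] at hp hslen
      by_cases hpx : x ≤ stage + 60
      · have hd : decide (x ≤ stage + 60) = true := decide_eq_true hpx
        have htw : (x :: xs).takeWhile (fun i : Int => decide (i ≤ stage + 60))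
            = x :: xs.takeWhile (fun i : Int => decide (i ≤ stage + 60)) := by
          simp [List.takeWhile_cons, hd]
        rw [htw]
        rw [if_neg (by simp)]
        have hfold := pvFoldlRemoveTakeWhile (fun i : Int => decide (i ≤ stage + 60)) (x :: xs)
        rw [htw] at hfold
        have hpair : (x :: xs.takeWhile (fun i : Int => decide (i ≤ stage + 60))).Pairwise (· ≤ ·) :=
          hp.sublist ((List.takeWhile_sublist _).cons₂ x)
        rw [PySem.List.max?_id_cons, Option.getD_some, pvFoldlMaxSorted x _ hpair]
        rw [hfold, List.dropWhile_cons, if_pos hd]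
        have hrest_pair : (xs.dropWhile (fun i : Int => decide (i ≤ stage + 60))).Pairwise (· ≤ ·) :=
          (List.pairwise_cons.mp hp).2.sublist (List.dropWhile_sublist _)
        have hrest_len : (xs.dropWhile (fun i : Int => decide (i ≤ stage + 60))).length ≤ n := by
          have h1 : (xs.dropWhile (fun i : Int => decide (i ≤ stage + 60))).length ≤ xs.length :=
            (List.dropWhile_sublist _).length_le
          simp only [List.length_cons] at hslen
          omega
        rw [ih _ _ _ hrest_len]
        rw [PySem.List.sorted_eq_self_of_pairwise _ _ hrest_pair]
        rw [csOuter]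
        simp only [if_pos hpx, csInner_spec]
      · have hd : decide (x ≤ stage + 60) = false := by simp [hpx]
        have htw : (x :: xs).takeWhile (fun i : Int => decide (i ≤ stage + 60)) = [] := by
          simp [List.takeWhile_cons, hd]
        rw [htw]
        simp only [List.isEmpty_nil, if_true]
        rw [csOuter, if_neg hpx]

-- ===== VERDICT (by name: the statement is the Claim_ definition above) =====
theorem check_stage_spec : Claim_equal_check_stage := by
  intro stage stages counter _
  unfold Spec_check_stage check_stage_alt
  exact pvMain stages.length stage stages counter le_rfl
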